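-- pv_equiv track=rewrite | github.com/f5yui/Internship-Program | Fw_user_similar.py | get_goods_num
-- ===== SOURCE A (Python) =====
-- def get_goods_num(user_goods_info):
--     # {u:{v:12, vv:15, vvv:25,...}, v:{u:12}}
--     user_similar = {}
--     # 2.列表->集合->交集数
--     for u in user_goods_info:
--         for v in user_goods_info:
--             u_set = set(user_goods_info[u])
--             v_set = set(user_goods_info[v])
--             if u not in user_similar:
--                 user_similar.setdefault(u, {})
--             if v not in user_similar[u]:
--                 user_similar[u].setdefault(v, 0)
--             user_similar[u][v] = len(u_set & v_set)
--     return user_similar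
-- ===== SOURCE B (Python) =====
-- def get_goods_num(user_goods_info):
--     # inverted index: good -> list of users owning it
--     index = {}
--     for u in user_goods_info:
--         for g in user_goods_info[u]:
--             index.setdefault(g, []).append(u)
--     # co-occurrence counts per (u, v) pair
--     co = {}
--     for owners in index.values():
--         for u in owners:
--             for v in owners:
--                 co[(u, v)] = co.get((u, v), 0) + 1
--     return {u: {v: co.get((u, v), 0) for v in user_goods_info}
--             for u in user_goods_info}
-- ===== Notes on version B (the rewrite author's own statement) =====
-- stated objective: faster
-- what changed: A recomputes both key sets and a full set intersection for every ordered pair of users; B builds an inverted index good -> owner list once and counts pair co-occurrences per good, then reads the counts off a dictionary.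
import Mathlib
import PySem

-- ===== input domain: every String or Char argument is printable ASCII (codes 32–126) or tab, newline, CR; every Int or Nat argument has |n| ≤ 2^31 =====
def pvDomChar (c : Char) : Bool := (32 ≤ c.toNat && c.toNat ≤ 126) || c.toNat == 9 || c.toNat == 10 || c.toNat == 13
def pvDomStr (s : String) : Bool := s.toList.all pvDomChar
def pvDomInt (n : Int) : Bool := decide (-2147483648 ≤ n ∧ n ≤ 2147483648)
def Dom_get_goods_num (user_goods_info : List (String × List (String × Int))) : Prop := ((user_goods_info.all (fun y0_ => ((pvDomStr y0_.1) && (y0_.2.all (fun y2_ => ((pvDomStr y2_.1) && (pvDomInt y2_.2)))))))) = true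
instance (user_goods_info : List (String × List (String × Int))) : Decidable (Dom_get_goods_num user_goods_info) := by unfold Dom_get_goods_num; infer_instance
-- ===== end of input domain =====

-- B replaces A's quadratic-in-users recomputation of key sets and pairwise set
-- intersections by an inverted index good -> owners with co-occurrence counting
-- (objective: faster, asymptotic in the size of the goods lists).

-- ===== PORT A =====
-- A: for u in dict, for v in dict: user_similar[u][v] = len(set(d[u]) & set(d[v]))
-- (set(inner dict) = the set of its keys; setdefault dance kept literally)
def get_goods_num (user_goods_info : List (String × List (String × Int))) : List (String × List (String × Int)) :=
  let d := PySem.Dict.ofList user_goods_info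
  let sim : PySem.Dict String (PySem.Dict String Int) :=
    d.keys.foldl (fun sim u =>
      d.keys.foldl (fun sim v =>
        let u_set := PySem.Set.ofList ((d.getD u []).map Prod.fst)
        let v_set := PySem.Set.ofList ((d.getD v []).map Prod.fst)
        let sim := if sim.contains u then sim else sim.setdefault u PySem.Dict.empty
        let inner := sim.getD u PySem.Dict.empty
        let inner := if inner.contains v then inner else inner.setdefault v 0
        let inner := inner.insert v (PySem.Set.len (PySem.Set.inter u_set v_set))
        sim.insert u inner) sim) PySem.Dict.empty
  sim.items.map (fun p => (p.1, p.2.items))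

-- ===== PORT B =====
-- B: inverted index good -> owner list, then count co-occurrences per user pair
def get_goods_num_alt (user_goods_info : List (String × List (String × Int))) : List (String × List (String × Int)) :=
  let d := PySem.Dict.ofList user_goods_info
  -- index.setdefault(g, []).append(u)  ==  modify g [] (· ++ [u])
  let index : PySem.Dict String (List String) :=
    d.keys.foldl (fun ix u =>
      (PySem.Set.ofList ((d.getD u []).map Prod.fst)).foldl
        (fun ix g => ix.modify g [] (· ++ [u])) ix) PySem.Dict.empty
  -- co[(u, v)] = co.get((u, v), 0) + 1
  let co : PySem.Dict (String × String) Int :=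
    index.values.foldl (fun co owners =>
      owners.foldl (fun co u =>
        owners.foldl (fun co v => co.modify (u, v) 0 (· + 1)) co) co) PySem.Dict.empty
  d.keys.map (fun u => (u, d.keys.map (fun v => (v, co.getD (u, v) 0))))

-- ===== PRECONDITION & SPEC =====
def Spec_get_goods_num (user_goods_info : List (String × List (String × Int))) (out : List (String × List (String × Int))) : Prop := out = get_goods_num_alt user_goods_info
instance (user_goods_info : List (String × List (String × Int))) (out : List (String × List (String × Int))) : Decidable (Spec_get_goods_num user_goods_info out) := by unfold Spec_get_goods_num; infer_instance

-- ===== CLAIM (what is proved, stated in full; the proofs are below) =====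
def Claim_equal_get_goods_num : Prop := ∀ (user_goods_info : List (String × List (String × Int))), Dom_get_goods_num user_goods_info → Spec_get_goods_num user_goods_info (get_goods_num user_goods_info)

-- ===== LEMMAS AND PROOFS =====

-- shared abbreviations (proof-side only)
def pvK (d : PySem.Dict String (List (String × Int))) (u : String) : List String :=
  PySem.Set.ofList ((d.getD u []).map Prod.fst)

def pvCA (d : PySem.Dict String (List (String × Int))) (u v : String) : Int :=
  PySem.Set.len (PySem.Set.inter (pvK d u) (pvK d v))

-- (d.insert k a).insert k b = d.insert k b
theorem pv_ins_ins {κ ν : Type} [BEq κ] [LawfulBEq κ] (d : PySem.Dict κ ν) (k : κ) (a b : ν) :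
    (d.insert k a).insert k b = d.insert k b := by
  apply PySem.Dict.ext
  by_cases h : d.contains k = true
  · rw [PySem.Dict.items_insert_of_contains _ b (PySem.Dict.contains_insert_self d k a),
        PySem.Dict.items_insert_of_contains _ a h,
        PySem.Dict.items_insert_of_contains _ b h, List.map_map]
    refine List.map_congr_left (fun p hp => ?_)
    by_cases hk : (p.1 == k) = true <;> simp [hk]
  · rw [PySem.Dict.items_insert_of_contains _ b (PySem.Dict.contains_insert_self d k a),
        PySem.Dict.items_insert_of_not_contains _ a (by simpa using h),
        PySem.Dict.items_insert_of_not_contains _ b (by simpa using h)]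
    have hmem : ∀ p ∈ d.items, (p.1 == k) = false := by
      intro p hp
      have : k ∉ d.keys := by
        intro hmem
        exact h ((PySem.Dict.contains_iff_mem_keys d k).mpr hmem)
      simp only [beq_eq_false_iff_ne, ne_eq]
      intro he; exact this (he ▸ List.mem_map_of_mem hp)
    simp only [List.map_append]
    have : List.map (fun p => if (p.1 == k) = true then (k, b) else p) d.items = List.map id d.items :=
      List.map_congr_left (fun p hp => by simp [hmem p hp])
    rw [List.map_id] at this
    rw [this]
    simp

-- nested foldl is a foldl over the flatMap
theorem pv_foldl_foldl {α β γ : Type} (l : List α) (g : α → List β) (f : γ → β → γ) (s : γ) :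
    l.foldl (fun s x => (g x).foldl f s) s = (l.flatMap g).foldl f s := by
  induction l generalizing s with
  | nil => rfl
  | cons x t ih => simp [List.flatMap_cons, List.foldl_append, ih]

theorem pv_count_flatMap {α β : Type} [BEq β] (l : List α) (g : α → List β) (x : β) :
    (l.flatMap g).count x = (l.map (fun a => (g a).count x)).sum := by
  induction l with
  | nil => rfl
  | cons a t ih => simp [List.flatMap_cons, List.count_append, ih]

theorem pv_count_pairs (ow : List String) (u v : String) :
    (ow.flatMap (fun a => ow.map (fun b => (a, b)))).count (u, v) = ow.count u * ow.count v := by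
  rw [pv_count_flatMap]
  have h1 : ∀ a : String, ((ow.map (fun b => (a, b))).count (u, v)) = if a = u then ow.count v else 0 := by
    intro a
    by_cases h : a = u
    · subst h
      simp only [List.count_eq_countP, List.countP_map, Function.comp_def]
      refine List.countP_congr (fun x _ => ?_)
      by_cases hxv : x = v <;> simp [hxv]
    · simp [List.count_eq_countP, List.countP_map, Function.comp_def, h]
  rw [List.map_congr_left (fun a _ => h1 a)]
  have h2 : ∀ (l : List String) (c : Nat), (l.map (fun a => if a = u then c else 0)).sum = l.count u * c := by
    intro l c
    induction l with
    | nil => simp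
    | cons a t ih =>
      by_cases h : a = u <;> simp [h, ih]
      ring
  exact h2 ow (ow.count v)

theorem pv_filter_beq_nodup {α : Type} [BEq α] [LawfulBEq α] (l : List α) (h : l.Nodup) (g : α) :
    l.filter (fun x => x == g) = if g ∈ l then [g] else [] := by
  induction l with
  | nil => simp
  | cons a t ih =>
    simp only [List.nodup_cons] at h
    by_cases hag : a = g
    · subst hag
      have ht : t.filter (fun x => x == a) = [] :=
        List.filter_eq_nil_iff.mpr (fun x hx => by
          simp only [beq_iff_eq]
          rintro rfl; exact h.1 hx)
      simp [ht]
    · simp [hag, ih h.2, Ne.symm hag]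

-- setdefault on an absent key is insert
theorem pv_setdefault_nc {κ ν : Type} [BEq κ] (d : PySem.Dict κ ν) (k : κ) (v : ν)
    (h : d.contains k = false) : d.setdefault k v = d.insert k v := by
  simp [PySem.Dict.setdefault, PySem.Dict.insert, h]

-- A's inner-loop body, named (definitionally equal to the lambda in the port)
def pvStepA (d : PySem.Dict String (List (String × Int))) (u : String)
    (sim : PySem.Dict String (PySem.Dict String Int)) (v : String) :
    PySem.Dict String (PySem.Dict String Int) :=
  let sim' := if sim.contains u = true then sim else sim.setdefault u PySem.Dict.empty
  let inner0 := sim'.getD u PySem.Dict.empty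
  let inner1 := if inner0.contains v = true then inner0 else inner0.setdefault v 0
  sim'.insert u (inner1.insert v (pvCA d u v))

-- one step of A's inner loop when u is already a key
theorem pv_step (d : PySem.Dict String (List (String × Int))) (u v : String)
    (sim : PySem.Dict String (PySem.Dict String Int)) (h : sim.contains u = true) :
    pvStepA d u sim v = sim.insert u ((sim.getD u PySem.Dict.empty).insert v (pvCA d u v)) := by
  unfold pvStepA
  simp only [h, if_true]
  by_cases hv : (sim.getD u PySem.Dict.empty).contains v = true
  · simp only [hv, if_true]
  · simp only [hv, Bool.false_eq_true, if_false,
      pv_setdefault_nc _ _ _ (by simpa using hv), pv_ins_ins]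

-- one step of A's inner loop when u is absent
theorem pv_step_new (d : PySem.Dict String (List (String × Int))) (u v : String)
    (sim : PySem.Dict String (PySem.Dict String Int)) (h : sim.contains u = false) :
    pvStepA d u sim v = sim.insert u (PySem.Dict.empty.insert v (pvCA d u v)) := by
  unfold pvStepA
  simp only [h, Bool.false_eq_true, if_false, pv_setdefault_nc _ _ _ h,
    PySem.Dict.getD_insert_self]
  have he : (PySem.Dict.empty : PySem.Dict String Int).contains v = false := by simp
  simp only [he, Bool.false_eq_true, if_false]
  rw [pv_setdefault_nc _ _ _ he]
  simp only [pv_ins_ins]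

-- A's inner loop starting from sim.insert u J accumulates inserts into J
theorem pv_inner_loop (d : PySem.Dict String (List (String × Int))) (u : String)
    (vs : List String) (sim : PySem.Dict String (PySem.Dict String Int))
    (J : PySem.Dict String Int) :
    vs.foldl (pvStepA d u) (sim.insert u J)
      = sim.insert u (vs.foldl (fun J v => J.insert v (pvCA d u v)) J) := by
  induction vs generalizing J with
  | nil => rfl
  | cons v t ih =>
    rw [List.foldl_cons,
        pv_step d u v (sim.insert u J) (PySem.Dict.contains_insert_self sim u J),
        PySem.Dict.getD_insert_self, pv_ins_ins, ih, List.foldl_cons]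

-- A's outer loop, with the inner list nonempty and all keys of l fresh
theorem pv_outer (d : PySem.Dict String (List (String × Int))) (w : String) (rest : List String) :
    ∀ (l : List String) (sim : PySem.Dict String (PySem.Dict String Int)),
      l.Nodup → (∀ x ∈ l, sim.contains x = false) →
      l.foldl (fun sim u => (w :: rest).foldl (pvStepA d u) sim) sim
        = l.foldl (fun sim u => sim.insert u
            ((w :: rest).foldl (fun J v => J.insert v (pvCA d u v)) PySem.Dict.empty)) sim := by
  intro l
  induction l with
  | nil => intro sim _ _; rfl
  | cons u t ih =>
    intro sim hnd hfresh
    simp only [List.nodup_cons] at hnd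
    rw [List.foldl_cons]
    have h1 : (w :: rest).foldl (pvStepA d u) sim
        = sim.insert u ((w :: rest).foldl (fun J v => J.insert v (pvCA d u v)) PySem.Dict.empty) := by
      rw [List.foldl_cons, pv_step_new d u w sim (hfresh u (List.mem_cons_self)),
          pv_inner_loop, List.foldl_cons]
    rw [h1]
    conv_rhs => rw [List.foldl_cons]
    refine ih _ hnd.2 (fun x hx => ?_)
    have hxu : (x == u) = false := by
      simp only [beq_eq_false_iff_ne, ne_eq]
      rintro rfl; exact hnd.1 hx
    rw [PySem.Dict.contains_insert, hxu, Bool.false_or]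
    exact hfresh x (List.mem_cons_of_mem _ hx)

-- A whole: items shape
theorem pv_A_shape (info : List (String × List (String × Int))) :
    get_goods_num info =
      (PySem.Dict.ofList info).keys.map (fun u => (u,
        (PySem.Dict.ofList info).keys.map (fun v => (v, pvCA (PySem.Dict.ofList info) u v)))) := by
  have hnd : (PySem.Dict.ofList info).keys.Nodup := PySem.Dict.nodup_keys_ofList info
  show ((PySem.Dict.ofList info).keys.foldl
      (fun sim u => (PySem.Dict.ofList info).keys.foldl (pvStepA (PySem.Dict.ofList info) u) sim)
      PySem.Dict.empty).items.map (fun p => (p.1, p.2.items)) = _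
  cases hk : (PySem.Dict.ofList info).keys with
  | nil => simp [PySem.Dict.empty]
  | cons w rest =>
    rw [pv_outer (PySem.Dict.ofList info) w rest (w :: rest) PySem.Dict.empty (hk ▸ hnd : (w :: rest).Nodup)
        (fun x _ => by simp)]
    rw [PySem.Dict.items_foldl_insert_fresh (w :: rest) (fun u => u)
        (fun u => (w :: rest).foldl (fun J v => J.insert v (pvCA (PySem.Dict.ofList info) u v)) PySem.Dict.empty)
        PySem.Dict.empty (fun a _ => by simp [PySem.Dict.empty]) (by simpa using (hk ▸ hnd : (w :: rest).Nodup))]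
    have hitems : ∀ u : String,
        ((w :: rest).foldl (fun J v => J.insert v (pvCA (PySem.Dict.ofList info) u v)) PySem.Dict.empty).items
          = (w :: rest).map (fun v => (v, pvCA (PySem.Dict.ofList info) u v)) := by
      intro u
      rw [PySem.Dict.items_foldl_insert_fresh (w :: rest) (fun v => v)
          (fun v => pvCA (PySem.Dict.ofList info) u v) PySem.Dict.empty
          (fun a _ => by simp [PySem.Dict.empty]) (by simpa using (hk ▸ hnd : (w :: rest).Nodup))]
      rfl
    have hemp : (PySem.Dict.empty : PySem.Dict String (PySem.Dict String Int)).items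
        = ([] : List (String × PySem.Dict String Int)) := rfl
    rw [hemp]
    simp only [List.nil_append, List.map_map, Function.comp_def]
    exact List.map_congr_left (fun u _ => by rw [hitems u])

-- B side characterization
def pvPs (d : PySem.Dict String (List (String × Int))) : List (String × String) :=
  d.keys.flatMap (fun u => (pvK d u).map (fun g => (g, u)))

def pvIndex (d : PySem.Dict String (List (String × Int))) : PySem.Dict String (List String) :=
  d.keys.foldl (fun ix u =>
    (PySem.Set.ofList ((d.getD u []).map Prod.fst)).foldl
      (fun ix g => ix.modify g [] (· ++ [u])) ix) PySem.Dict.empty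

theorem pv_index_eq (d : PySem.Dict String (List (String × Int))) :
    pvIndex d = (pvPs d).foldl (fun ix p => ix.modify p.1 [] (· ++ [p.2])) PySem.Dict.empty := by
  unfold pvIndex pvPs pvK
  rw [← pv_foldl_foldl]
  refine PySem.List.foldl_congr_mem _ _ _ _ (fun ix u _ => ?_)
  rw [List.foldl_map]

theorem pv_owners (d : PySem.Dict String (List (String × Int))) (g : String) :
    (pvIndex d).getD g [] = d.keys.filter (fun u => (pvK d u).contains g) := by
  rw [pv_index_eq, PySem.Dict.getD_foldl_modify_append]
  have hemp : (PySem.Dict.empty : PySem.Dict String (List String)).getD g [] = [] := by simp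
  rw [hemp, List.nil_append]
  unfold pvPs
  rw [List.filter_flatMap, List.map_flatMap]
  induction d.keys with
  | nil => rfl
  | cons u t ih =>
    rw [List.flatMap_cons, List.filter_cons, ih]
    rw [List.filter_map]
    rw [show ((fun (p : String × String) => p.1 == g) ∘ (fun g' => ((g' : String), u)))
        = (fun g' => g' == g) from rfl]
    have hndK : (pvK d u).Nodup := PySem.Set.nodup_ofList _
    rw [pv_filter_beq_nodup (pvK d u) hndK g]
    by_cases hm : g ∈ pvK d u
    · simp only [pvK] at hm ⊢
      simp [hm]
    · simp only [pvK] at hm ⊢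
      simp [hm]

theorem pv_index_keys (d : PySem.Dict String (List (String × Int))) :
    (pvIndex d).keys = PySem.Set.ofList (d.keys.flatMap (fun u => pvK d u)) := by
  rw [pv_index_eq]
  rw [PySem.Dict.keys_foldl_modify_key (pvPs d) Prod.fst [] (fun _ p => (· ++ [p.2]))
      PySem.Dict.empty]
  rw [PySem.Dict.keys_empty, PySem.Set.update_nil_left]
  unfold pvPs
  rw [List.map_flatMap]
  simp [Function.comp_def]

theorem pv_index_values (d : PySem.Dict String (List (String × Int))) :
    (pvIndex d).values = ((pvIndex d).keys).map (fun g => (pvIndex d).getD g []) := by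
  have hnd : (pvIndex d).keys.Nodup := by
    rw [pv_index_keys]; exact PySem.Set.nodup_ofList _
  show ((pvIndex d).items).map (fun x => x.2) = _
  rw [PySem.Dict.items_eq_map_keys (pvIndex d) hnd [], List.map_map]
  rfl

-- the final pointwise count equality
theorem pv_counts_eq (d : PySem.Dict String (List (String × Int))) (u v : String)
    (hnd : d.keys.Nodup) (hu : u ∈ d.keys) (hv : v ∈ d.keys) :
    pvCA d u v =
      ((pvIndex d).values.foldl (fun co owners =>
        owners.foldl (fun co u =>
          owners.foldl (fun co v => co.modify (u, v) 0 (· + 1)) co) co) PySem.Dict.empty).getD (u, v) 0 := by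
  have hco : (pvIndex d).values.foldl (fun co ow =>
        ow.foldl (fun co a => ow.foldl (fun co b => co.modify (a, b) 0 (· + 1)) co) co) PySem.Dict.empty
      = PySem.Dict.counter ((pvIndex d).values.flatMap
          (fun ow => ow.flatMap (fun a => ow.map (fun b => (a, b))))) := by
    rw [PySem.Dict.counter_eq_foldl, ← pv_foldl_foldl]
    refine PySem.List.foldl_congr_mem _ _ _ _ (fun co ow _ => ?_)
    rw [← pv_foldl_foldl]
    refine PySem.List.foldl_congr_mem _ _ _ _ (fun co a _ => ?_)
    rw [List.foldl_map]
  rw [hco, PySem.Dict.getD_counter, pv_count_flatMap,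
      List.map_congr_left (fun ow _ => pv_count_pairs ow u v)]
  have hvals : (pvIndex d).values
      = ((pvIndex d).keys).map (fun g => d.keys.filter (fun x => (pvK d x).contains g)) := by
    rw [pv_index_values]
    exact List.map_congr_left (fun g _ => pv_owners d g)
  rw [hvals, List.map_map]
  simp only [Function.comp_def]
  have hcnt : ∀ (x : String), x ∈ d.keys → ∀ (g : String),
      (d.keys.filter (fun y => (pvK d y).contains g)).count x
        = if (pvK d x).contains g then 1 else 0 := by
    intro x hx g
    by_cases hp : (pvK d x).contains g = true
    · rw [List.count_filter (p := fun y => (pvK d y).contains g) (a := x) (l := d.keys) hp,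
          List.count_eq_one_of_mem hnd hx, if_pos hp]
    · rw [if_neg hp]
      refine List.count_eq_zero.mpr (fun hmem => ?_)
      exact hp (List.mem_filter.mp hmem).2
  have hterm : ∀ g : String,
      ((d.keys.filter (fun y => (pvK d y).contains g)).count u
        * (d.keys.filter (fun y => (pvK d y).contains g)).count v)
      = if ((pvK d u).contains g && (pvK d v).contains g) then 1 else 0 := by
    intro g
    rw [hcnt u hu g, hcnt v hv g]
    by_cases hm1 : g ∈ pvK d u <;> by_cases hm2 : g ∈ pvK d v <;>
      simp [hm1, hm2]
  rw [List.map_congr_left (fun g _ => hterm g)]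
  have hsum : ∀ (l : List String) (p : String → Bool),
      (l.map (fun g => if p g then 1 else 0)).sum = l.countP p := by
    intro l p
    induction l with
    | nil => rfl
    | cons a t ih =>
      by_cases h : p a = true <;> simp [h, ih] <;> omega
  rw [hsum _ (fun g => (pvK d u).contains g && (pvK d v).contains g),
      List.countP_eq_length_filter]
  have hxG : ∀ x : String, x ∈ pvK d u → x ∈ (pvIndex d).keys := by
    intro x hx
    rw [pv_index_keys]
    exact (PySem.Set.mem_ofList _ _).mpr (List.mem_flatMap.mpr ⟨u, hu, hx⟩)
  have hperm : (((pvIndex d).keys).filter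
        (fun g => (pvK d u).contains g && (pvK d v).contains g)).Perm
      ((pvK d u).filter (fun x => (pvK d v).contains x)) := by
    have hGnd : (pvIndex d).keys.Nodup := by
      rw [pv_index_keys]; exact PySem.Set.nodup_ofList _
    refine (List.perm_ext_iff_of_nodup (hGnd.filter _)
      ((PySem.Set.nodup_ofList _).filter _)).mpr (fun x => ?_)
    simp only [List.mem_filter, Bool.and_eq_true, List.contains_iff_mem]
    constructor
    · rintro ⟨-, hxu, hxv⟩; exact ⟨hxu, hxv⟩
    · rintro ⟨hxu, hxv⟩; exact ⟨hxG x hxu, hxu, hxv⟩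
  rw [hperm.length_eq]
  rfl

-- ===== VERDICT (by name: the statement is the Claim_ definition above) =====
theorem get_goods_num_spec : Claim_equal_get_goods_num := by
  intro info _
  unfold Spec_get_goods_num
  rw [pv_A_shape]
  show _ = get_goods_num_alt info
  unfold get_goods_num_alt
  simp only []
  refine List.map_congr_left (fun u hu => ?_)
  refine congrArg (Prod.mk u) (List.map_congr_left (fun v hv => ?_))
  exact congrArg (Prod.mk v) (pv_counts_eq (PySem.Dict.ofList info) u v (PySem.Dict.nodup_keys_ofList info) hu hv)
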